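-- pv_equiv track=rewrite | github.com/quantumlib/OpenFermion | src/openfermion/utils/_bch_expansion.py | split_by_descending_edge
-- ===== SOURCE A (Python) =====
-- def split_by_descending_edge(bin_str):
--     """
--     Split binary string representation by descending edges,
--     i.e. '0101' -> '01 | 01'
--     e.g. '01001101' -> ['01', '0011', '01']
--     """
--     prev = '0'
--     split_idx = [0]
--
--     # generate a list of indices where split needs to happen
--     for idx, i in enumerate(bin_str):
--         if prev == '1' and i == '0':
--             split_idx.append(idx)
--         prev = i
--
--     # split by taking substrings between each two split indices
--     if len(split_idx) == 1:
--         return [bin_str]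
--     else:
--         return [bin_str[i:j] for i, j in zip(split_idx, split_idx[1:]+[None])]
-- ===== SOURCE B (Python) =====
-- def split_by_descending_edge(bin_str):
--     """Single pass: build chunks directly, cutting before each '1'->'0' edge."""
--     result = []
--     cur = []
--     prev = '0'
--     for ch in bin_str:
--         if prev == '1' and ch == '0':
--             result.append(''.join(cur))
--             cur = []
--         cur.append(ch)
--         prev = ch
--     result.append(''.join(cur))
--     return result
-- ===== Notes on version B (the rewrite author's own statement) =====
-- stated objective: simpler
-- what changed: B builds the chunks directly in one accumulator pass (cutting before each '1'->'0' edge), eliminating A's split-index list and its second zip-and-slice pass.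
import Mathlib
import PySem

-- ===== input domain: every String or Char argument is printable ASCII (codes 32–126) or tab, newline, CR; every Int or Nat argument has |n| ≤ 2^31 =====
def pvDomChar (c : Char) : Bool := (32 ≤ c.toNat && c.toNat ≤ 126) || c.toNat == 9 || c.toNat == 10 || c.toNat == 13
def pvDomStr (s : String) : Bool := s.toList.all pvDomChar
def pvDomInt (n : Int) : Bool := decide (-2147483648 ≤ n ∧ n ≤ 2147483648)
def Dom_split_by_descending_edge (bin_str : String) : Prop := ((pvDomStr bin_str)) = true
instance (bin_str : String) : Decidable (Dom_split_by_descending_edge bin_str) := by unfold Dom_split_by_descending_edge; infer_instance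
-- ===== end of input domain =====

-- B builds the chunks directly in one accumulator pass, replacing A's split-index
-- list plus zip-and-slice pass (same O(n) cost; objective: simpler decomposition).


-- ===== PORT A =====
def split_by_descending_edge (bin_str : String) : List String :=
  let st := (PySem.List.enumerate bin_str.toList 0).foldl
    (fun (st : Char × List Int) p =>
      (p.2, if st.1 = '1' ∧ p.2 = '0' then st.2 ++ [p.1] else st.2))
    ('0', [(0 : Int)])
  let split_idx := st.2
  if split_idx.length = 1 then [bin_str]
  else (split_idx.zip ((split_idx.drop 1).map some ++ [none])).map
    (fun p => PySem.Str.slice bin_str (some p.1) p.2)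

-- ===== PORT B =====
def split_by_descending_edge_alt (bin_str : String) : List String :=
  let st := bin_str.toList.foldl
    (fun (st : List String × List Char × Char) ch =>
      if st.2.2 = '1' ∧ ch = '0' then (st.1 ++ [String.ofList st.2.1], [ch], ch)
      else (st.1, st.2.1 ++ [ch], ch))
    ([], [], '0')
  st.1 ++ [String.ofList st.2.1]

-- ===== PRECONDITION & SPEC =====
def Spec_split_by_descending_edge (bin_str : String) (out : List String) : Prop := out = split_by_descending_edge_alt bin_str
instance (bin_str : String) (out : List String) : Decidable (Spec_split_by_descending_edge bin_str out) := by unfold Spec_split_by_descending_edge; infer_instance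

-- ===== CLAIM (what is proved, stated in full; the proofs are below) =====
def Claim_equal_split_by_descending_edge : Prop := ∀ (bin_str : String), Dom_split_by_descending_edge bin_str → Spec_split_by_descending_edge bin_str (split_by_descending_edge bin_str)

-- ===== LEMMAS AND PROOFS =====

-- split positions (as Nats), counting from n
def splitsN (prev : Char) (n : Nat) : List Char → List Nat
  | [] => []
  | c :: t => (if prev = '1' ∧ c = '0' then [n] else []) ++ splitsN c (n + 1) t

-- the chunks B builds
def chunksP (prev : Char) (cur : List Char) : List Char → List (List Char)
  | [] => [cur]
  | c :: t => if prev = '1' ∧ c = '0' then cur :: chunksP c [c] t else chunksP c (cur ++ [c]) t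

-- the substrings A takes between consecutive split indices (last one to the end)
def sliceChunks (full : List Char) : List Nat → List (List Char)
  | [] => []
  | [i] => [full.drop i]
  | i :: j :: rest => (full.drop i).take (j - i) :: sliceChunks full (j :: rest)

theorem foldA (l : List Char) : ∀ (n : Nat) (prev : Char) (acc : List Int),
    ((PySem.List.enumerate l (n : Int)).foldl
      (fun (st : Char × List Int) p =>
        (p.2, if st.1 = '1' ∧ p.2 = '0' then st.2 ++ [p.1] else st.2))
      (prev, acc)).2
    = acc ++ (splitsN prev n l).map Int.ofNat := by
  induction l with
  | nil => intro n prev acc; simp [splitsN, PySem.List.enumerate_nil]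
  | cons c t ih =>
    intro n prev acc
    rw [PySem.List.enumerate_cons]
    simp only [List.foldl_cons]
    have : ((n : Int) + 1) = ((n + 1 : Nat) : Int) := by push_cast; ring
    rw [this, ih (n + 1)]
    by_cases h : prev = '1' ∧ c = '0' <;> simp [splitsN, h]

theorem foldB (l : List Char) : ∀ (prev : Char) (cur : List Char) (res : List String),
    (let st := l.foldl
      (fun (st : List String × List Char × Char) ch =>
        if st.2.2 = '1' ∧ ch = '0' then (st.1 ++ [String.ofList st.2.1], [ch], ch)
        else (st.1, st.2.1 ++ [ch], ch))
      (res, cur, prev)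
     st.1 ++ [String.ofList st.2.1])
    = res ++ (chunksP prev cur l).map String.ofList := by
  induction l with
  | nil => intro prev cur res; simp [chunksP]
  | cons c t ih =>
    intro prev cur res
    by_cases h : prev = '1' ∧ c = '0'
    · simp only [List.foldl_cons, if_pos h]
      rw [ih]
      simp [chunksP, h]
    · simp only [List.foldl_cons, if_neg h]
      rw [ih]
      simp [chunksP, h]

theorem splitsN_add (l : List Char) : ∀ (prev : Char) (n k : Nat),
    splitsN prev (k + n) l = (splitsN prev n l).map (· + k) := by
  induction l with
  | nil => intro prev n k; simp [splitsN]
  | cons c t ih =>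
    intro prev n k
    simp only [splitsN]
    rw [show k + n + 1 = k + (n + 1) from by omega, ih c (n + 1) k]
    by_cases h : prev = '1' ∧ c = '0' <;> simp [h, Nat.add_comm]

theorem drop_shift (s r : List Char) (m : Nat) :
    (s ++ r).drop (m + s.length) = r.drop m := by
  rw [List.drop_append]
  rw [List.drop_eq_nil_of_le (by omega), Nat.add_sub_cancel, List.nil_append]

theorem shift (ps : List Nat) : ∀ (r s : List Char),
    sliceChunks (s ++ r) (ps.map (· + s.length)) = sliceChunks r ps := by
  induction ps with
  | nil => intro r s; simp [sliceChunks]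
  | cons i tl ih =>
    intro r s
    cases tl with
    | nil => simp only [List.map_cons, List.map_nil, sliceChunks, drop_shift]
    | cons j rest =>
      have h2 : (j + s.length) - (i + s.length) = j - i := by omega
      simp only [List.map_cons, sliceChunks, h2, drop_shift]
      rw [show ((j + s.length) :: List.map (· + s.length) rest)
            = List.map (· + s.length) (j :: rest) from rfl, ih]

theorem mainLem (l : List Char) : ∀ (prev : Char) (s : List Char),
    sliceChunks (s ++ l) (0 :: splitsN prev s.length l) = chunksP prev s l := by
  induction l with
  | nil => intro prev s; simp [splitsN, sliceChunks, chunksP]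
  | cons c t ih =>
    intro prev s
    by_cases h : prev = '1' ∧ c = '0'
    · rw [show splitsN prev s.length (c :: t)
            = s.length :: splitsN c (s.length + 1) t from by simp [splitsN, h]]
      have htake : List.take s.length (s ++ c :: t) = s := by simp
      simp only [sliceChunks, List.drop_zero, Nat.sub_zero, htake]
      have hadd : splitsN c (s.length + 1) t = (splitsN c 1 t).map (· + s.length) :=
        splitsN_add t c 1 s.length
      rw [hadd,
        show (s.length :: (splitsN c 1 t).map (· + s.length))
            = ((0 :: splitsN c 1 t).map (· + s.length)) from by simp,
        shift (0 :: splitsN c 1 t) (c :: t) s,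
        show chunksP prev s (c :: t) = s :: chunksP c [c] t from by simp [chunksP, h]]
      exact congrArg _ (ih c [c])
    · rw [show splitsN prev s.length (c :: t) = splitsN c (s.length + 1) t from by
            simp [splitsN, h],
          show chunksP prev s (c :: t) = chunksP c (s ++ [c]) t from by simp [chunksP, h]]
      have h2 := ih c (s ++ [c])
      simp only [List.append_assoc, List.singleton_append, List.length_append,
        List.length_cons, List.length_nil, Nat.zero_add] at h2
      exact h2

theorem zipSlice (ns : List Nat) (s : String) :
    ((ns.map Int.ofNat).zip
        (((ns.map Int.ofNat).drop 1).map some ++ [none])).map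
      (fun p => PySem.Str.slice s (some p.1) p.2)
    = (sliceChunks s.toList ns).map String.ofList := by
  induction ns with
  | nil => simp [sliceChunks]
  | cons i tl ih =>
    cases tl with
    | nil =>
      simp only [List.map_cons, List.map_nil, List.drop_succ_cons, List.drop_nil,
        List.nil_append, List.zip_cons_cons, List.zip_nil_right, List.map_cons,
        List.map_nil, sliceChunks]
      have hhead : PySem.Str.slice s (some (Int.ofNat i)) none
          = String.ofList (s.toList.drop i) := by
        rw [← String.ofList_toList (s := PySem.Str.slice s (some (Int.ofNat i)) none),
          PySem.Str.toList_slice]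
        simp [PySem.List.slice_from_natCast]
      rw [hhead]
    | cons j rest =>
      simp only [List.map_cons, List.drop_succ_cons, List.drop_zero, List.cons_append,
        List.zip_cons_cons, List.map_cons, sliceChunks]
      have hhead : PySem.Str.slice s (some (Int.ofNat i)) (some (Int.ofNat j))
          = String.ofList ((s.toList.drop i).take (j - i)) := by
        rw [← String.ofList_toList (s := PySem.Str.slice s (some (Int.ofNat i)) (some (Int.ofNat j))),
          PySem.Str.toList_slice]
        simp [PySem.List.slice_natCast]
      rw [hhead]
      refine congrArg _ ?_
      simpa only [List.map_cons, List.drop_succ_cons, List.drop_zero] using ih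

theorem split_eq (bin_str : String) :
    split_by_descending_edge bin_str = split_by_descending_edge_alt bin_str := by
  unfold split_by_descending_edge split_by_descending_edge_alt
  rw [foldB]
  have hA := foldA bin_str.toList 0 '0' [(0 : Int)]
  simp only [Nat.cast_zero] at hA
  simp only [hA]
  have hmain := mainLem bin_str.toList '0' []
  simp only [List.nil_append, List.length_nil] at hmain
  cases hz : splitsN '0' 0 bin_str.toList with
  | nil =>
    rw [hz] at hmain
    rw [← hmain]
    simp [sliceChunks, String.ofList_toList]
  | cons jj rest =>
    rw [hz] at hmain
    rw [if_neg (by simp)]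
    have hz' := zipSlice (0 :: jj :: rest) bin_str
    simp only [List.map_cons] at hz'
    rw [show Int.ofNat 0 = (0 : Int) from rfl] at hz'
    simp only [List.singleton_append, List.nil_append, List.map_cons]
    rw [hz', hmain]

-- ===== VERDICT (by name: the statement is the Claim_ definition above) =====
theorem split_by_descending_edge_spec : Claim_equal_split_by_descending_edge := by
  intro bin_str _
  unfold Spec_split_by_descending_edge
  exact split_eq bin_str
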